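-- pv_equiv track=rewrite | github.com/Consensys/mythril | mythril/ether/asm.py | find_opcode_sequence
-- ===== SOURCE A (Python) =====
-- def find_opcode_sequence(pattern, instruction_list):
--     match_indexes = []
--
--     pattern_length = len(pattern)
--
--     for i in range(0, len(instruction_list) - pattern_length + 1):
--
--         if instruction_list[i]['opcode'] == pattern[0]:
--
--             matched = True
--
--             for j in range(1, len(pattern)):
--
--                 if not (instruction_list[i + j]['opcode'] == pattern[j]):
--                     matched = False
--                     break
--
--             if (matched):
--                 match_indexes.append(i)
--
--     return match_indexes
-- ===== SOURCE B (Python) =====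
-- def find_opcode_sequence(pattern, instruction_list):
--     # Inverted index: opcode -> increasing list of positions; the pattern is then
--     # matched by intersecting shifted posting lists instead of sliding a window.
--     positions = {}
--     for i, instruction in enumerate(instruction_list):
--         positions.setdefault(instruction['opcode'], []).append(i)
--     candidates = positions.get(pattern[0], [])
--     for j in range(1, len(pattern)):
--         posting = set(positions.get(pattern[j], []))
--         candidates = [i for i in candidates if i + j in posting]
--     return [i for i in candidates if i + len(pattern) <= len(instruction_list)]
-- ===== Notes on version B (the rewrite author's own statement) =====
-- stated objective: alternative
-- what changed: B builds an inverted index (opcode -> posting list of positions) in one pass and finds matches by intersecting shifted posting lists (candidates for pattern[0] filtered per pattern offset by set membership), instead of A's sliding-window scan comparing each window against the pattern. Pre_ excludes empty patterns (both raise IndexError) and instruction lists in which some dict lacks an 'opcode' key: there A raises KeyError, or returns only because its scan stops before the keyless dict that B's one-pass indexing touches.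
-- outside the precondition, e.g. on find_opcode_sequence(['Z', 'B'], [{'opcode': 'A'}, {'opcode': 'A'}, {'x': 'y'}]): A returns [], B raises KeyError
import Mathlib
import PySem

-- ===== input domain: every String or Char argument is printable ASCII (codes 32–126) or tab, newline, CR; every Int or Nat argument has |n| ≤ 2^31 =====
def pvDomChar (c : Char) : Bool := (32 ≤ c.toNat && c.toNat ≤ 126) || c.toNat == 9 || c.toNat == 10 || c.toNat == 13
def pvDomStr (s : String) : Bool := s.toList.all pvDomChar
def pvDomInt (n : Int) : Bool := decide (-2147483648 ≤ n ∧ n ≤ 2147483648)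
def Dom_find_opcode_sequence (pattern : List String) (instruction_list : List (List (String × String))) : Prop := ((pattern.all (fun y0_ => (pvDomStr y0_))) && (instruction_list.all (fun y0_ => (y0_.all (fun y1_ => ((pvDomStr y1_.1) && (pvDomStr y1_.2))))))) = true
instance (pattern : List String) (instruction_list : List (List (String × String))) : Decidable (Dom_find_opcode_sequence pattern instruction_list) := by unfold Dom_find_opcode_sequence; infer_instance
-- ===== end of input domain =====

-- B replaces A's sliding-window scan by an inverted index (opcode -> posting list of
-- positions, built in one pass) and matches the pattern by filtering the posting list
-- of pattern[0] per pattern offset j against the (shifted) posting set of pattern[j];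
-- alternative algorithm, same worst-case cost.

-- d['opcode'] on the association list of a Python dict: first match.
def pvOpcode (d : List (String × String)) : String :=
  ((d.find? (fun p => p.1 == "opcode")).map Prod.snd).getD ""

-- ===== PORT A =====
def find_opcode_sequence (pattern : List String) (instruction_list : List (List (String × String))) : List Int :=
  let pattern_length : Int := pattern.length
  (PySem.List.pyRange 0 ((instruction_list.length : Int) - pattern_length + 1) 1).foldl
    (fun match_indexes i =>
      if pvOpcode ((PySem.List.pyGet? instruction_list i).getD []) == (PySem.List.pyGet? pattern 0).getD "" then
        -- inner 'for j in range(1, len(pattern))' with break: short-circuiting all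
        let matched := (PySem.List.pyRange 1 (pattern.length : Int) 1).all
          (fun j => pvOpcode ((PySem.List.pyGet? instruction_list (i + j)).getD []) == (PySem.List.pyGet? pattern j).getD "")
        if matched then match_indexes ++ [i] else match_indexes
      else match_indexes) []

-- ===== PORT B =====
def find_opcode_sequence_alt (pattern : List String) (instruction_list : List (List (String × String))) : List Int :=
  -- positions = {}; for i, instruction in enumerate(...): positions.setdefault(op, []).append(i)
  let positions : PySem.Dict String (List Int) :=
    (PySem.List.enumerate instruction_list 0).foldl
      (fun d p => d.modify (pvOpcode p.2) [] (fun l => l ++ [p.1])) PySem.Dict.empty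
  let candidates0 := positions.getD ((PySem.List.pyGet? pattern 0).getD "") []
  -- for j in range(1, len(pattern)): candidates = [i for i in candidates if i + j in posting]
  let candidates := (PySem.List.pyRange 1 (pattern.length : Int) 1).foldl
    (fun c j =>
      let posting := PySem.Set.ofList (positions.getD ((PySem.List.pyGet? pattern j).getD "") [])
      c.filter (fun i => PySem.Set.contains posting (i + j))) candidates0
  candidates.filter (fun i => decide (i + (pattern.length : Int) ≤ (instruction_list.length : Int)))

-- ===== PRECONDITION & SPEC =====
-- Pre_ excludes empty patterns (both A and B raise IndexError there) and instruction
-- lists in which some dict lacks an 'opcode' key: on those A raises KeyError, or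
-- returns only because its scan stops before the keyless dict that B's one-pass
-- indexing touches.
def Pre_find_opcode_sequence (pattern : List String) (instruction_list : List (List (String × String))) : Prop :=
  pattern ≠ [] ∧ ∀ d ∈ instruction_list, "opcode" ∈ d.map Prod.fst
instance (pattern : List String) (instruction_list : List (List (String × String))) : Decidable (Pre_find_opcode_sequence pattern instruction_list) := by unfold Pre_find_opcode_sequence; infer_instance

def pvWitness_find_opcode_sequence : List String × (List (List (String × String))) :=
  (["PUSH1", "ADD"], [[("opcode", "PUSH1"), ("argument", "0x01")], [("opcode", "ADD")], [("opcode", "PUSH1")]])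

def Spec_find_opcode_sequence (pattern : List String) (instruction_list : List (List (String × String))) (out : List Int) : Prop := out = find_opcode_sequence_alt pattern instruction_list
instance (pattern : List String) (instruction_list : List (List (String × String))) (out : List Int) : Decidable (Spec_find_opcode_sequence pattern instruction_list out) := by unfold Spec_find_opcode_sequence; infer_instance

-- ===== CLAIM (what is proved, stated in full; the proofs are below) =====
def Claim_equal_find_opcode_sequence : Prop := ∀ (pattern : List String) (instruction_list : List (List (String × String))), Dom_find_opcode_sequence pattern instruction_list → Pre_find_opcode_sequence pattern instruction_list → Spec_find_opcode_sequence pattern instruction_list (find_opcode_sequence pattern instruction_list)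

-- ===== LEMMAS AND PROOFS =====
set_option maxRecDepth 4000

-- shorthand used only in the proofs: the opcode at (possibly out-of-range) index i
def pvOpAt (il : List (List (String × String))) (i : Int) : String :=
  pvOpcode ((PySem.List.pyGet? il i).getD [])

theorem enumerate_eq_map_range (il : List (List (String × String))) :
    ∀ s : Int, PySem.List.enumerate il s
      = (List.range il.length).map (fun k : Nat => (s + (k : Int), il.getD k [])) := by
  induction il with
  | nil => intro s; simp [PySem.List.enumerate_nil]
  | cons x t ih =>
    intro s
    rw [PySem.List.enumerate_cons, ih (s+1)]
    simp [List.range_succ_eq_map, List.map_map, Function.comp_def]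
    intro a _
    ring

theorem getD_buildPos (il : List (List (String × String))) (op : String) :
    ((PySem.List.enumerate il 0).foldl
        (fun d p => d.modify (pvOpcode p.2) [] (fun l => l ++ [p.1])) PySem.Dict.empty).getD op []
      = (PySem.List.pyRange 0 (il.length : Int) 1).filter (fun i => pvOpAt il i == op) := by
  have h1 : (PySem.List.enumerate il 0).foldl
        (fun d p => d.modify (pvOpcode p.2) [] (fun l => l ++ [p.1])) PySem.Dict.empty
      = (((PySem.List.enumerate il 0).map (fun p => (pvOpcode p.2, p.1))).foldl
        (fun d q => d.modify q.1 [] (fun l => l ++ [q.2])) PySem.Dict.empty) := by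
    rw [List.foldl_map]
  rw [h1, PySem.Dict.getD_foldl_modify_append, PySem.Dict.getD_empty, List.nil_append]
  rw [enumerate_eq_map_range il 0, PySem.List.pyRange_one]
  simp only [List.map_map, Function.comp_def, zero_add, Int.sub_zero, Int.toNat_natCast]
  rw [List.filter_map, List.filter_map, List.map_map]
  congr 1
  · apply List.filter_congr
    intro k hk
    simp [pvOpAt, PySem.List.pyGet?_natCast, List.getD_eq_getElem?_getD]

theorem foldl_filter_chain (q : Int → Int → Bool) :
    ∀ (js : List Int) (c0 : List Int),
      js.foldl (fun c j => c.filter (q j)) c0 = c0.filter (fun i => js.all (fun j => q j i)) := by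
  intro js
  induction js with
  | nil => intro c0; simp
  | cons j t ih =>
    intro c0
    rw [List.foldl_cons, ih, List.filter_filter]
    apply List.filter_congr
    intro i _
    simp [Bool.and_comm]

theorem foldl_nested_if (l : List Int) (P Q : Int → Bool) (acc : List Int) :
    l.foldl (fun a i => if P i then (if Q i then a ++ [i] else a) else a) acc
      = acc ++ l.filter (fun i => P i && Q i) := by
  induction l generalizing acc with
  | nil => simp
  | cons x t ih =>
    by_cases hP : P x <;> by_cases hQ : Q x <;>
      simp [hP, hQ, ih]

theorem ports_eq (pattern : List String) (il : List (List (String × String)))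
    (hp : pattern ≠ []) : find_opcode_sequence pattern il = find_opcode_sequence_alt pattern il := by
  unfold find_opcode_sequence find_opcode_sequence_alt
  simp only [getD_buildPos]
  rw [foldl_nested_if, List.nil_append,
      foldl_filter_chain (fun j i => PySem.Set.contains (PySem.Set.ofList
        ((PySem.List.pyRange 0 (il.length : Int) 1).filter
          (fun i' => pvOpAt il i' == (PySem.List.pyGet? pattern j).getD ""))) (i + j)),
      List.filter_filter, List.filter_filter]
  have hm : 0 < pattern.length := List.length_pos_iff.mpr hp
  set n : Int := (il.length : Int) with hn
  set m : Int := (pattern.length : Int) with hmdef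
  have hm1 : 1 ≤ m := by simp [hmdef]; omega
  by_cases hmn : m ≤ n
  · rw [PySem.List.pyRange_one_append 0 (n - m + 1) n (by omega) (by omega), List.filter_append]
    have h2 : ∀ C P : Int → Bool,
        (PySem.List.pyRange (n - m + 1) n 1).filter
          (fun i => (decide (i + m ≤ n) && C i) && P i) = [] := by
      intro C P
      rw [List.filter_eq_nil_iff]
      intro i hi
      have := PySem.List.mem_pyRange_one.mp hi
      simp only [Bool.and_eq_true, decide_eq_true_eq, not_and, and_imp]
      intro h _
      omega
    rw [h2 _ _, List.append_nil]
    apply List.filter_congr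
    intro i hi
    obtain ⟨hi0, hilt⟩ := PySem.List.mem_pyRange_one.mp hi
    have hbound : decide (i + m ≤ n) = true := by simp; omega
    rw [hbound, Bool.true_and]
    rw [Bool.eq_iff_iff]
    simp only [Bool.and_eq_true, List.all_eq_true]
    constructor
    · rintro ⟨hP, hQ⟩
      refine ⟨?_, hP⟩
      intro j hj
      obtain ⟨hj1, hjm⟩ := PySem.List.mem_pyRange_one.mp hj
      rw [PySem.Set.contains_iff, PySem.Set.mem_ofList, List.mem_filter,
        ← PySem.List.pyRange_one_append 0 (n - m + 1) n (by omega) (by omega),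
        PySem.List.mem_pyRange_one]
      exact ⟨⟨by omega, by omega⟩, hQ j hj⟩
    · rintro ⟨hC, hP⟩
      refine ⟨hP, ?_⟩
      intro j hj
      have := hC j hj
      rw [PySem.Set.contains_iff, PySem.Set.mem_ofList, List.mem_filter] at this
      exact this.2
  · have hA : PySem.List.pyRange 0 (n - m + 1) 1 = [] :=
      PySem.List.pyRange_one_eq_nil (by omega)
    rw [hA, List.filter_nil]
    symm
    rw [List.filter_eq_nil_iff]
    intro i hi
    have := PySem.List.mem_pyRange_one.mp hi
    simp only [Bool.and_eq_true, decide_eq_true_eq, not_and]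
    intro _
    omega

-- ===== VERDICT (by name: the statement is the Claim_ definition above) =====
theorem find_opcode_sequence_spec : Claim_equal_find_opcode_sequence := by
  intro pattern instruction_list _ hpre
  exact ports_eq pattern instruction_list hpre.1
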